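-- pv_equiv track=rewrite | github.com/mdalaminab17/academic-problem-solving-archive | python/dificult_contest.py | solve
-- ===== SOURCE A (Python) =====
-- def solve(s):
--
--     t = []
--     other = []
--
--     for ch in s:
--         if ch == 'T':
--             t.append(ch)
--         else:
--             other.append(ch)
--     return t + other
-- ===== SOURCE B (Python) =====
-- def solve(s):
--     return sorted(s, key=lambda ch: ch != 'T')
-- ===== Notes on version B (the rewrite author's own statement) =====
-- stated objective: idiomatic
-- what changed: Replaced the two-buffer partition loop with a single stable sort keyed on (ch != 'T'); stability keeps each group's original order, so the result is identical.
import Mathlib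
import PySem

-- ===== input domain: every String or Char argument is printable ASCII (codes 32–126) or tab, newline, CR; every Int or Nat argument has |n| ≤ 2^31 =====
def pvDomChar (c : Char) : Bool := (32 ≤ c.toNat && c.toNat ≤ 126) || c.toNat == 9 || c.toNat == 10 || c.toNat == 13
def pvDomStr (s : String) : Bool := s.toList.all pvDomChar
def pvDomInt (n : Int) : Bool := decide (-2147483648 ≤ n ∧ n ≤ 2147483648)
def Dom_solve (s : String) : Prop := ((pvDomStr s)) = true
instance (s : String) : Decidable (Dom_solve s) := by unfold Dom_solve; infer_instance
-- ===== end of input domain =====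

-- B replaces A's two-buffer partition loop with one stable sort keyed on (ch != 'T'); same result, more idiomatic.


-- ===== PORT A =====
-- for ch in s: append ch to t if ch == 'T' else to other; return t + other
def solve (s : String) : List String :=
  let r := s.toList.foldl
    (fun (acc : List String × List String) c =>
      let ch := String.singleton c
      if ch = "T" then (acc.1 ++ [ch], acc.2) else (acc.1, acc.2 ++ [ch]))
    ([], [])
  r.1 ++ r.2

-- ===== PORT B =====
-- return sorted(s, key=lambda ch: ch != 'T')   (Bool key, False < True as in Python)
def solve_alt (s : String) : List String :=
  PySem.List.sorted (s.toList.map String.singleton) (fun ch => ch != "T") false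

-- ===== PRECONDITION & SPEC =====
def Spec_solve (s : String) (out : List String) : Prop := out = solve_alt s
instance (s : String) (out : List String) : Decidable (Spec_solve s out) := by unfold Spec_solve; infer_instance

-- ===== CLAIM (what is proved, stated in full; the proofs are below) =====
def Claim_equal_solve : Prop := ∀ (s : String), Dom_solve s → Spec_solve s (solve s)

-- ===== LEMMAS AND PROOFS =====

-- inserting "T" into (all-"T" ++ all-non-"T") puts it right between the groups
theorem pv_insert_T (t o : List String) (ht : ∀ a ∈ t, a = "T") (ho : ∀ a ∈ o, a ≠ "T") :
    PySem.List.insertBy (fun a b => decide ((a != "T") < (b != "T"))) "T" (t ++ o)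
      = t ++ "T" :: o := by
  induction t with
  | nil =>
    cases o with
    | nil => simp [PySem.List.insertBy]
    | cons y ys =>
      have hy : (y != "T") = true := bne_iff_ne.mpr (ho y (by simp))
      simp [PySem.List.insertBy, hy]
  | cons a t' ih =>
    have ha : a = "T" := ht a (by simp)
    subst ha
    simp only [List.cons_append, PySem.List.insertBy]
    simp only [bne_self_eq_false]
    simp [ih (fun a h => ht a (by simp [h]))]

-- inserting a non-"T" element goes to the very end
theorem pv_insert_other (x : String) (hx : x ≠ "T") (l : List String) :
    PySem.List.insertBy (fun a b => decide ((a != "T") < (b != "T"))) x l = l ++ [x] := by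
  apply PySem.List.insertBy_of_forall_not_before
  intro y _
  have : (x != "T") = true := bne_iff_ne.mpr hx
  simp [this]

-- loop invariant: A's partition fold from (t,o) equals continuing B's insertion fold from t ++ o
theorem pv_loop (xs : List String) : ∀ (t o : List String),
    (∀ a ∈ t, a = "T") → (∀ a ∈ o, a ≠ "T") →
    (let r := xs.foldl
        (fun (acc : List String × List String) ch =>
          if ch = "T" then (acc.1 ++ [ch], acc.2) else (acc.1, acc.2 ++ [ch])) (t, o)
     r.1 ++ r.2)
    = xs.foldl
        (fun acc x => PySem.List.insertBy (fun a b => decide ((a != "T") < (b != "T"))) x acc)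
        (t ++ o) := by
  induction xs with
  | nil => intro t o _ _; simp
  | cons x xs ih =>
    intro t o ht ho
    by_cases hx : x = "T"
    · subst hx
      simp only [List.foldl_cons]
      rw [pv_insert_T t o ht ho]
      have := ih (t ++ ["T"]) o
        (by intro a h; rcases List.mem_append.mp h with h | h
            · exact ht a h
            · simpa using h) ho
      simpa using this
    · simp only [List.foldl_cons, if_neg hx, pv_insert_other x hx (t ++ o)]
      have := ih t (o ++ [x]) ht
        (by intro a h; rcases List.mem_append.mp h with h | h
            · exact ho a h
            · simp at h; subst h; exact hx)
      simpa using this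

-- ===== VERDICT (by name: the statement is the Claim_ definition above) =====
theorem solve_spec : Claim_equal_solve := by
  intro s _
  unfold Spec_solve solve solve_alt
  rw [PySem.List.sorted_eq_foldl_insertBy]
  have := pv_loop (s.toList.map String.singleton) [] [] (by simp) (by simp)
  rw [List.foldl_map] at this
  simpa using this
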